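-- pv_equiv track=rewrite | github.com/asweigart/programmedpatterns | book/visualpatterns.py | pattern36
-- ===== SOURCE A (Python) =====
-- def pattern36(step):
--     pattern = 'O'
--     i = 2
--     while True:
--         if i > step:
--             break
--         pattern += ''
--         i += 1
--
--         if i > step:
--             break
--         pattern += 'OO'
--         i += 1
--
--         if i > step:
--             break
--         pattern += ''
--         i += 1
--     return pattern
-- ===== SOURCE B (Python) =====
-- def pattern36(step):
--     return 'O' + 'OO' * (step // 3)
-- ===== Notes on version B (the rewrite author's own statement) =====
-- stated objective: faster
-- what changed: replaced the step-by-step while loop (which appends 'OO' every third iteration) with the closed form 'O' + 'OO' * (step // 3)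
import Mathlib
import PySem

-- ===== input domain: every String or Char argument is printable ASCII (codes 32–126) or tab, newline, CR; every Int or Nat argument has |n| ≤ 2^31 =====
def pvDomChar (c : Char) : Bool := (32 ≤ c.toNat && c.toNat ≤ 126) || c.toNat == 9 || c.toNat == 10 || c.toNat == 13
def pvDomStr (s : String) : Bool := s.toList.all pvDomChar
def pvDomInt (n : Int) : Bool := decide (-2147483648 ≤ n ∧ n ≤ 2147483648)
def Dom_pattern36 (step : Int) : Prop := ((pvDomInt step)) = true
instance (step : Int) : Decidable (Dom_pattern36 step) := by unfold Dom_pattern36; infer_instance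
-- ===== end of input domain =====

-- B replaces A's step-by-step while loop with the closed form 'O' + 'OO' * (step // 3) (asymptotically less loop work).


-- ===== PORT A =====
-- faithful transliteration of A's 'while True' loop; terminates because i strictly increases toward step
def pattern36Loop (step i : Int) (pattern : String) : String :=
  if i > step then pattern
  -- pattern += ''; i += 1
  else if i + 1 > step then pattern ++ ""
  -- pattern += 'OO'; i += 1
  else if i + 2 > step then pattern ++ "" ++ "OO"
  -- pattern += ''; i += 1; loop again
  else pattern36Loop step (i + 3) (pattern ++ "" ++ "OO" ++ "")
termination_by (step + 1 - i).toNat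
decreasing_by omega

def pattern36 (step : Int) : String := pattern36Loop step 2 "O"

-- ===== PORT B =====
-- 'O' + 'OO' * (step // 3); Python string repetition with a negative count yields '' (toNat clamp)
def pattern36_alt (step : Int) : String :=
  "O" ++ String.join (List.replicate (PySem.Int.floordiv step 3).toNat "OO")

-- ===== PRECONDITION & SPEC =====
def Spec_pattern36 (step : Int) (out : String) : Prop := out = pattern36_alt step
instance (step : Int) (out : String) : Decidable (Spec_pattern36 step out) := by unfold Spec_pattern36; infer_instance

-- ===== CLAIM (what is proved, stated in full; the proofs are below) =====
def Claim_equal_pattern36 : Prop := ∀ (step : Int), Dom_pattern36 step → Spec_pattern36 step (pattern36 step)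

-- ===== LEMMAS AND PROOFS =====

theorem str_foldl_append (l : List String) (s : String) :
    List.foldl (fun r t => r ++ t) s l = s ++ List.foldl (fun r t => r ++ t) "" l := by
  induction l generalizing s with
  | nil => simp
  | cons a l ih =>
    rw [List.foldl_cons, List.foldl_cons, ih (s ++ a), ih ("" ++ a)]
    simp [String.append_assoc]

theorem pattern36Loop_eq (step i : Int) (pattern : String) :
    pattern36Loop step i pattern
      = pattern ++ String.join (List.replicate ((step - i + 2).toNat / 3) "OO") := by
  fun_induction pattern36Loop step i pattern with
  | case1 i pattern h =>
    have : (step - i + 2).toNat / 3 = 0 := by omega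
    simp [this, String.join]
  | case2 i pattern h h1 =>
    have : (step - i + 2).toNat / 3 = 0 := by omega
    simp [this, String.join]
  | case3 i pattern h h1 h2 =>
    have : (step - i + 2).toNat / 3 = 1 := by omega
    simp [this, String.join]
  | case4 i pattern h h1 h2 ih =>
    rw [ih]
    have hn : (step - i + 2).toNat / 3 = (step - (i + 3) + 2).toNat / 3 + 1 := by
      have : (step - i + 2).toNat = (step - (i + 3) + 2).toNat + 3 := by omega
      omega
    rw [hn, List.replicate_succ]
    simp [String.join, String.append_assoc]
    exact (str_foldl_append _ "OO").symm

theorem pattern36_floordiv_toNat (step : Int) :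
    (PySem.Int.floordiv step 3).toNat = (step).toNat / 3 := by
  by_cases h : 0 ≤ step
  · obtain ⟨n, rfl⟩ := Int.eq_ofNat_of_zero_le h
    have h3 : (3:Int) = ((3:Nat):Int) := rfl
    rw [h3, PySem.Int.floordiv_natCast]
    omega
  · have := (PySem.Int.floordiv_lt_iff_lt_mul (a := step) (b := 3) (q := 0) (by norm_num)).mpr (by omega)
    omega


-- ===== VERDICT (by name: the statement is the Claim_ definition above) =====
theorem pattern36_spec : Claim_equal_pattern36 := by
  intro step _
  show pattern36 step = pattern36_alt step
  unfold pattern36 pattern36_alt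
  rw [pattern36Loop_eq, pattern36_floordiv_toNat]
  have : (step - 2 + 2).toNat = step.toNat := by omega
  rw [this]
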